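-- pv_equiv track=rewrite | github.com/usertestbstmrc/aed-tp3 | modulo.py | det_may_nom
-- ===== SOURCE A (Python) =====
-- def det_may_nom(cant, gen_nom):
--     n = len(cant)
--     may_nom = 0
--     may = 0
--     for i in range(n):
--         if cant[i] > may:
--             may_nom = gen_nom[i]
--             may = cant[i]
--     return may_nom
-- ===== SOURCE B (Python) =====
-- def det_may_nom(cant, gen_nom):
--     if not cant:
--         return 0
--     m = max(cant)
--     if m <= 0:
--         return 0
--     return gen_nom[cant.index(m)]
-- ===== Notes on version B (the rewrite author's own statement) =====
-- stated objective: simpler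
-- what changed: Replaces the hand-written running-max scan with two library passes: max(cant), then gen_nom[cant.index(m)], which picks the first occurrence exactly like A's strict '>' rule.
-- outside the precondition, e.g. on det_may_nom([-3, 0], ['a', 'b']): A returns 0, B returns 0; on det_may_nom([], []): A returns 0, B returns 0
import Mathlib
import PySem

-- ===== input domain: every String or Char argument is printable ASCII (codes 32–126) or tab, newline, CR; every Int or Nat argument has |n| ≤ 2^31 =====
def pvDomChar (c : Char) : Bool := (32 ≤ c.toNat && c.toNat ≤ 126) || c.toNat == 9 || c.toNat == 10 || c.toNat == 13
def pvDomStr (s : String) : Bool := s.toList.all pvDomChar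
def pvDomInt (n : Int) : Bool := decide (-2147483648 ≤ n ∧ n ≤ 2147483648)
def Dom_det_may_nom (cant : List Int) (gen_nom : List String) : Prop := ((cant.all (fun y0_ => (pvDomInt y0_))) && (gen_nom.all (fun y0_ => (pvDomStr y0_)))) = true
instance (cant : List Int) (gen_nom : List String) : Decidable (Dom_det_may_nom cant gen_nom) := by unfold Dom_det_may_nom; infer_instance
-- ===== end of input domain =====

-- B replaces A's single hand-written running-max scan by two library passes (max, then first index of the max); objective: simpler.

-- ===== PORT A =====
-- Python's may_nom starts as the int 0 (not a String); inputs where that sentinel could be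
-- returned (max ≤ 0 or empty list) are excluded by Pre_, so "" stands in for it here.
def det_may_nom (cant : List Int) (gen_nom : List String) : String :=
  let n : Int := cant.length
  ((PySem.List.pyRange 0 n 1).foldl
      (fun (s : String × Int) i =>
        if PySem.List.pyGetD cant i 0 > s.2 then
          (PySem.List.pyGetD gen_nom i "", PySem.List.pyGetD cant i 0)
        else s)
      ("", 0)).1

-- ===== PORT B =====
-- Python B returns the int 0 on an empty list or a non-positive max; those inputs are outside
-- Pre_, "" stands in.  gen_nom[...] is pyGetD with default "" (exact inside Pre_: index in range).
def det_may_nom_alt (cant : List Int) (gen_nom : List String) : String :=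
  match PySem.List.max? cant (fun x => x) with
  | none => ""
  | some m =>
    if m ≤ 0 then ""
    else PySem.List.pyGetD gen_nom (((PySem.List.index? cant m).getD 0 : Nat) : Int) ""

-- ===== PRECONDITION & SPEC =====
-- Pre_ excludes (a) inputs where A raises IndexError (gen_nom shorter than the first position
-- of the positive maximum) and (b) inputs where A returns the Python int 0 instead of a string
-- (empty list or max ≤ 0) — a value outside the declared return type.
def Pre_det_may_nom (cant : List Int) (gen_nom : List String) : Prop :=
  (match PySem.List.max? cant (fun x => x) with
   | none => false
   | some m => decide (0 < m) && decide (((PySem.List.index? cant m).getD 0) < gen_nom.length)) = true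
instance (cant : List Int) (gen_nom : List String) : Decidable (Pre_det_may_nom cant gen_nom) := by
  unfold Pre_det_may_nom; infer_instance

def pvWitness_det_may_nom : List Int × List String := ([2, 5, 5, 1], ["a", "b", "c", "d"])

def Spec_det_may_nom (cant : List Int) (gen_nom : List String) (out : String) : Prop := out = det_may_nom_alt cant gen_nom
instance (cant : List Int) (gen_nom : List String) (out : String) : Decidable (Spec_det_may_nom cant gen_nom out) := by unfold Spec_det_may_nom; infer_instance

-- ===== CLAIM (what is proved, stated in full; the proofs are below) =====
def Claim_equal_det_may_nom : Prop := ∀ (cant : List Int) (gen_nom : List String), Dom_det_may_nom cant gen_nom → Pre_det_may_nom cant gen_nom → Spec_det_may_nom cant gen_nom (det_may_nom cant gen_nom)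

-- ===== LEMMAS AND PROOFS =====

-- running max of A, seeded at 0
def pvM (l : List Int) : Int := l.foldl max 0

-- the value A's state (may_nom) holds, expressed through B's primitives
def pvN (gen_nom : List String) (l : List Int) : String :=
  if 0 < pvM l then PySem.List.pyGetD gen_nom (((PySem.List.index? l (pvM l)).getD 0 : Nat) : Int) ""
  else ""

theorem pv_foldl_max_ub (l : List Int) (a : Int) : (∀ x ∈ l, x ≤ l.foldl max a) ∧ a ≤ l.foldl max a := by
  induction l generalizing a with
  | nil => simp
  | cons h t ih =>
    simp only [List.foldl_cons, List.mem_cons]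
    refine ⟨?_, le_trans (le_max_left a h) (ih (max a h)).2⟩
    rintro x (rfl | hx)
    · exact le_trans (le_max_right a x) (ih (max a x)).2
    · exact (ih (max a h)).1 x hx

theorem pv_foldl_max_mem (l : List Int) (a : Int) : l.foldl max a = a ∨ l.foldl max a ∈ l := by
  induction l generalizing a with
  | nil => simp
  | cons h t ih =>
    simp only [List.foldl_cons, List.mem_cons]
    rcases ih (max a h) with he | hm
    · rw [he]
      rcases le_total a h with hc | hc
      · right; left; omega
      · left; omega
    · right; right; exact hm

theorem pv_foldl_max_max (l : List Int) (a b : Int) :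
    l.foldl max (max a b) = max a (l.foldl max b) := by
  induction l generalizing b with
  | nil => simp
  | cons h t ih =>
    simp only [List.foldl_cons, max_assoc, ih (max b h)]

-- the loop invariant: after k steps A's state is (pvN take k, pvM take k)
theorem pvA_loop (cant : List Int) (gen_nom : List String) (k : Nat) (hk : k ≤ cant.length) :
    (PySem.List.pyRange 0 (k : Int) 1).foldl
      (fun (s : String × Int) i =>
        if PySem.List.pyGetD cant i 0 > s.2 then
          (PySem.List.pyGetD gen_nom i "", PySem.List.pyGetD cant i 0)
        else s)
      ("", 0)
    = (pvN gen_nom (cant.take k), pvM (cant.take k)) := by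
  induction k with
  | zero => simp [PySem.List.pyRange_one_eq_nil, pvN, pvM]
  | succ k ih =>
    have hk' : k ≤ cant.length := Nat.le_of_succ_le hk
    have hkl : k < cant.length := hk
    have hle : (0 : Int) ≤ (k : Int) := Int.natCast_nonneg k
    have hsplit : PySem.List.pyRange 0 ((k : Int) + 1) 1
        = PySem.List.pyRange 0 (k : Int) 1 ++ [(k : Int)] :=
      PySem.List.pyRange_one_succ_right hle
    have hcast : ((k + 1 : Nat) : Int) = ((k : Nat) : Int) + 1 := by push_cast; ring
    rw [hcast, hsplit, List.foldl_append, ih hk']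
    set t := cant.take k with ht
    have htlen : t.length = k := by simp [ht, Nat.min_eq_left hk']
    have htake : cant.take (k + 1) = t ++ [cant[k]] := by
      rw [ht, List.take_add_one]
      simp [List.getElem?_eq_getElem hkl]
    have hgetc : PySem.List.pyGetD cant (k : Int) 0 = cant[k] := by
      rw [PySem.List.pyGetD_natCast, List.getD_eq_getElem cant 0 hkl]
    have hM : pvM (t ++ [cant[k]]) = max (pvM t) cant[k] := by
      simp [pvM, List.foldl_append]
    simp only [List.foldl_cons, List.foldl_nil, hgetc, htake]
    by_cases hgt : cant[k] > pvM t
    · rw [if_pos hgt]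
      have hMnn : 0 ≤ pvM t := (pv_foldl_max_ub t 0).2
      have hxpos : 0 < cant[k] := lt_of_le_of_lt hMnn hgt
      have hnotmem : cant[k] ∉ t := by
        intro hmem
        exact absurd ((pv_foldl_max_ub t 0).1 _ hmem) (not_le.mpr hgt)
      have hMx : pvM (t ++ [cant[k]]) = cant[k] := by
        rw [hM]; omega
      have hidx : PySem.List.index? (t ++ [cant[k]]) cant[k] = some t.length :=
        PySem.List.index?_append_singleton_self _ _ hnotmem
      simp only [PySem.List.index?_eq_idxOf?] at hidx
      simp [pvN, hMx, hxpos, hidx, htlen]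
    · rw [if_neg hgt]
      have hxle : cant[k] ≤ pvM t := not_lt.mp hgt
      have hMx : pvM (t ++ [cant[k]]) = pvM t := by rw [hM]; omega
      by_cases hpos : 0 < pvM t
      · have hmem : pvM t ∈ t := by
          rcases pv_foldl_max_mem t 0 with he | hm
          · exact absurd hpos (by simp [pvM, he])
          · exact hm
        have hidx : PySem.List.index? (t ++ [cant[k]]) (pvM t) = PySem.List.index? t (pvM t) :=
          PySem.List.index?_append_of_mem _ hmem
        simp only [PySem.List.index?_eq_idxOf?] at hidx
        simp [pvN, hMx, hpos, hidx]
      · simp [pvN, hMx, hpos]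

-- ===== VERDICT (by name: the statement is the Claim_ definition above) =====
theorem det_may_nom_spec : Claim_equal_det_may_nom := by
  unfold Claim_equal_det_may_nom
  intro cant gen_nom _hdom hpre
  unfold Spec_det_may_nom
  have hA : det_may_nom cant gen_nom = pvN gen_nom cant := by
    simp only [det_may_nom]
    rw [pvA_loop cant gen_nom cant.length (le_refl _)]
    simp
  rw [hA]
  cases cant with
  | nil => exact absurd hpre (by simp [Pre_det_may_nom, PySem.List.max?])
  | cons h t =>
    have hmax : PySem.List.max? (h :: t) (fun x => x) = some (t.foldl max h) :=
      PySem.List.max?_id_cons h t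
    unfold Pre_det_may_nom at hpre
    rw [hmax] at hpre
    simp only [Bool.and_eq_true, decide_eq_true_eq] at hpre
    obtain ⟨hmpos, _hidx⟩ := hpre
    have hMm : pvM (h :: t) = t.foldl max h := by
      have hmm : t.foldl max (max 0 h) = max 0 (t.foldl max h) := pv_foldl_max_max t 0 h
      simp only [pvM, List.foldl_cons, hmm]
      omega
    have hneg : ¬ (List.foldl max h t ≤ 0) := not_le.mpr hmpos
    simp [det_may_nom_alt, hmax, hneg, pvN, hMm, hmpos]
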